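-- pv_equiv track=rewrite | github.com/shawinsoranakom/CodeSnippets | ComplexMethod/cm040543.py | shape_equal
-- ===== SOURCE A (Python) =====
-- def shape_equal(shape1, shape2, axis=None, allow_none=True):
--     """Check if two shapes are equal.
--
--     Args:
--         shape1: A list or tuple of integers for first shape to be compared.
--         shape2: A list or tuple of integers for second shape to be compared.
--         axis: An integer, list, or tuple of integers (optional):
--             Axes to ignore during comparison. Defaults to `None`.
--         allow_none (bool, optional): If `True`, allows `None` in a shape
--             to match any value in the corresponding position of the other shape.
--             Defaults to `True`.
--
--     Returns:
--         bool: `True` if shapes are considered equal based on the criteria,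
--         `False` otherwise.
--
--     Examples:
--
--     >>> shape_equal((32, 64, 128), (32, 64, 128))
--     True
--     >>> shape_equal((32, 64, 128), (32, 64, 127))
--     False
--     >>> shape_equal((32, 64, None), (32, 64, 128), allow_none=True)
--     True
--     >>> shape_equal((32, 64, None), (32, 64, 128), allow_none=False)
--     False
--     >>> shape_equal((32, 64, 128), (32, 63, 128), axis=1)
--     True
--     >>> shape_equal((32, 64, 128), (32, 63, 127), axis=(1, 2))
--     True
--     >>> shape_equal((32, 64, 128), (32, 63, 127), axis=[1,2])
--     True
--     >>> shape_equal((32, 64), (32, 64, 128))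
--     False
--     """
--     if len(shape1) != len(shape2):
--         return False
--
--     shape1 = list(shape1)
--     shape2 = list(shape2)
--
--     if axis is not None:
--         if isinstance(axis, int):
--             axis = [axis]
--         for ax in axis:
--             shape1[ax] = -1
--             shape2[ax] = -1
--
--     if allow_none:
--         for i in range(len(shape1)):
--             if shape1[i] is None:
--                 shape1[i] = shape2[i]
--             if shape2[i] is None:
--                 shape2[i] = shape1[i]
--
--     return shape1 == shape2
-- ===== SOURCE B (Python) =====
-- def shape_equal(shape1, shape2, axis=None, allow_none=True):
--     if len(shape1) != len(shape2):
--         return False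
--     n = len(shape1)
--     if axis is None:
--         skip = set()
--     elif isinstance(axis, int):
--         skip = {axis % n}
--     else:
--         skip = {ax % n for ax in axis}
--     for i, (a, b) in enumerate(zip(shape1, shape2)):
--         if i in skip:
--             continue
--         if a == b:
--             continue
--         if allow_none and (a is None or b is None):
--             continue
--         return False
--     return True
-- ===== Notes on version B (the rewrite author's own statement) =====
-- stated objective: simpler
-- what changed: Instead of building masked copies of both shapes, None-filling them in place and comparing whole lists, B builds a set of normalized ignored indices once and does a single early-exit pass checking each position (skipped, equal, or None-wildcard).
import Mathlib
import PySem

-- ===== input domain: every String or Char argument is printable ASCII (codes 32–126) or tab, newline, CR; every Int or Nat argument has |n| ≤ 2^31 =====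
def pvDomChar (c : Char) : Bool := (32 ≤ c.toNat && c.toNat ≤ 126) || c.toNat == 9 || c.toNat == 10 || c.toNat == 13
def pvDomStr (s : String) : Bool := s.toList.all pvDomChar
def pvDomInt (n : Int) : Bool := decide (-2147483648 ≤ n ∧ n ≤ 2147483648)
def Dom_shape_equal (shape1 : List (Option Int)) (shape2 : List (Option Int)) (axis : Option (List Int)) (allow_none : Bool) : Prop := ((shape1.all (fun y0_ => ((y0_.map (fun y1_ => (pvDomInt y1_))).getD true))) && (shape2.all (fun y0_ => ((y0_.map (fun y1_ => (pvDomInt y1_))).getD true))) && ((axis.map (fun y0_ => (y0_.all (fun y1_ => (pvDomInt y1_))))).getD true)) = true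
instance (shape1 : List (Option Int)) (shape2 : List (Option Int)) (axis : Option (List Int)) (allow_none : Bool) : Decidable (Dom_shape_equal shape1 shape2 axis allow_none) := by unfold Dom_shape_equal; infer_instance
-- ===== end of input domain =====

-- B replaces A's build-masked-copies-then-None-fill-then-compare with one early-exit pass over a
-- precomputed set of normalized ignored indices (objective: simpler; A's in-place mutation of its
-- local copies is not observable by the caller).

-- ===== PORT A =====
-- shape1[ax] = -1; shape2[ax] = -1  (IndexError = none threads through the fold)
def pvMaskStep (st : Option (List (Option Int) × List (Option Int))) (ax : Int) :
    Option (List (Option Int) × List (Option Int)) :=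
  st.bind fun p =>
    match PySem.List.pySet? p.1 ax (some (-1)), PySem.List.pySet? p.2 ax (some (-1)) with
    | some a, some b => some (a, b)
    | _, _ => none

-- body of 'for i in range(len(shape1))' in A's allow_none loop
def pvFillStep (p : List (Option Int) × List (Option Int)) (i : Nat) :
    List (Option Int) × List (Option Int) :=
  let q1 := if p.1.getD i none = none then p.1.set i (p.2.getD i none) else p.1
  let q2 := if p.2.getD i none = none then p.2.set i (q1.getD i none) else p.2
  (q1, q2)

def shape_equal (shape1 : List (Option Int)) (shape2 : List (Option Int)) (axis : Option (List Int)) (allow_none : Bool) : Bool :=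
  if shape1.length ≠ shape2.length then false
  else
    match (match axis with
           | none => some (shape1, shape2)
           | some l => l.foldl pvMaskStep (some (shape1, shape2))) with
    | none => false        -- unreachable under Pre_: an axis entry raised IndexError
    | some p =>
      let q := if allow_none then (List.range p.1.length).foldl pvFillStep p else p
      q.1 == q.2

-- ===== PORT B =====
-- one position of B's loop: a == b or (allow_none and (a is None or b is None))
def pvPassPos (a b : Option Int) (allow_none : Bool) : Bool :=
  a == b || (allow_none && (a == none || b == none))

def shape_equal_alt (shape1 : List (Option Int)) (shape2 : List (Option Int)) (axis : Option (List Int)) (allow_none : Bool) : Bool :=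
  if shape1.length ≠ shape2.length then false
  else
    let n : Int := shape1.length
    let skip : PySem.Set Int := match axis with
      | none => PySem.Set.empty
      | some l => PySem.Set.ofList (l.map (fun ax => PySem.Int.mod ax n))
    (PySem.List.enumerate (shape1.zip shape2) 0).all fun ip =>
      PySem.Set.contains skip ip.1 || pvPassPos ip.2.1 ip.2.2 allow_none

-- ===== PRECONDITION & SPEC =====
-- Pre_ excludes exactly the inputs where A raises: an axis entry outside [-len, len)
-- (reached only when the lengths agree, since A length-checks first).
def Pre_shape_equal (shape1 : List (Option Int)) (shape2 : List (Option Int)) (axis : Option (List Int)) (allow_none : Bool) : Prop :=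
  shape1.length = shape2.length →
    ∀ ax ∈ axis.getD [], -(shape1.length : Int) ≤ ax ∧ ax < (shape1.length : Int)
instance (shape1 : List (Option Int)) (shape2 : List (Option Int)) (axis : Option (List Int)) (allow_none : Bool) : Decidable (Pre_shape_equal shape1 shape2 axis allow_none) := by unfold Pre_shape_equal; infer_instance
def pvWitness_shape_equal : List (Option Int) × List (Option Int) × Option (List Int) × Bool :=
  ([some 32, none], [some 32, some 5], some [-1], true)

def Spec_shape_equal (shape1 : List (Option Int)) (shape2 : List (Option Int)) (axis : Option (List Int)) (allow_none : Bool) (out : Bool) : Prop := out = shape_equal_alt shape1 shape2 axis allow_none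
instance (shape1 : List (Option Int)) (shape2 : List (Option Int)) (axis : Option (List Int)) (allow_none : Bool) (out : Bool) : Decidable (Spec_shape_equal shape1 shape2 axis allow_none out) := by unfold Spec_shape_equal; infer_instance

-- ===== CLAIM (what is proved, stated in full; the proofs are below) =====
def Claim_equal_shape_equal : Prop := ∀ (shape1 : List (Option Int)) (shape2 : List (Option Int)) (axis : Option (List Int)) (allow_none : Bool), Dom_shape_equal shape1 shape2 axis allow_none → Pre_shape_equal shape1 shape2 axis allow_none → Spec_shape_equal shape1 shape2 axis allow_none (shape_equal shape1 shape2 axis allow_none)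

-- ===== LEMMAS AND PROOFS =====

-- normalized index of a Python list assignment xs[ax] = v on a list of length n
def pvNorm (n : Nat) (ax : Int) : Nat := if ax < 0 then n - (-ax).toNat else ax.toNat

-- masking one shape: A's 'for ax in axis: shape[ax] = -1', one component
def pvMask (n : Nat) (s : List (Option Int)) (l : List Int) : List (Option Int) :=
  l.foldl (fun s ax => s.set (pvNorm n ax) (some (-1))) s

-- the pointwise effect of A's allow_none loop
def pvF1 (a b : Option Int) : Option Int := if a = none then b else a
def pvF2 (a b : Option Int) : Option Int := if b = none then pvF1 a b else b

theorem length_pvMask (n : Nat) (s : List (Option Int)) (l : List Int) :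
    (pvMask n s l).length = s.length := by
  induction l generalizing s with
  | nil => rfl
  | cons ax l ih => simp only [pvMask, List.foldl_cons] at *; rw [ih]; simp

theorem pvNorm_lt (n : Nat) (ax : Int) (h1 : -(n : Int) ≤ ax) (h2 : ax < n) : pvNorm n ax < n := by
  unfold pvNorm; split_ifs <;> omega

theorem pyIdx_eq_pvNorm (n : Nat) (ax : Int) (h1 : -(n : Int) ≤ ax) (h2 : ax < n) :
    PySem.List.pyIdx? n ax = some (pvNorm n ax) := by
  simp only [PySem.List.pyIdx?, pvNorm]
  split_ifs <;> simp_all <;> omega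

theorem pySet_eq (s : List (Option Int)) (ax : Int) (v : Option Int) (n : Nat) (hs : s.length = n)
    (h1 : -(n : Int) ≤ ax) (h2 : ax < n) :
    PySem.List.pySet? s ax v = some (s.set (pvNorm n ax) v) := by
  simp [PySem.List.pySet?, hs, pyIdx_eq_pvNorm n ax h1 h2]

theorem mask_fold (l : List Int) (s1 s2 : List (Option Int)) (n : Nat)
    (h1 : s1.length = n) (h2 : s2.length = n)
    (hv : ∀ ax ∈ l, -(n : Int) ≤ ax ∧ ax < (n : Int)) :
    l.foldl pvMaskStep (some (s1, s2)) = some (pvMask n s1 l, pvMask n s2 l) := by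
  induction l generalizing s1 s2 with
  | nil => rfl
  | cons ax l ih =>
    obtain ⟨ha1, ha2⟩ := hv ax (List.mem_cons_self ..)
    simp only [List.foldl_cons, pvMaskStep, Option.bind_some]
    rw [pySet_eq s1 ax _ n h1 ha1 ha2, pySet_eq s2 ax _ n h2 ha1 ha2]
    simp only [pvMask, List.foldl_cons]
    exact ih _ _ (by simp [h1]) (by simp [h2]) (fun a ha => hv a (List.mem_cons_of_mem _ ha))

theorem getD_set_eq (s : List (Option Int)) (k i : Nat) (v : Option Int) (hk : k < s.length) :
    (s.set k v).getD i none = if k = i then v else s.getD i none := by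
  rw [List.getD_eq_getElem?_getD, List.getD_eq_getElem?_getD, List.getElem?_set]
  by_cases h : k = i
  · simp [h, show i < s.length from by omega]
  · simp [h]

theorem getD_pvMask (n : Nat) (s : List (Option Int)) (l : List Int) (i : Nat)
    (hs : s.length = n)
    (hv : ∀ ax ∈ l, -(n : Int) ≤ ax ∧ ax < (n : Int)) :
    (pvMask n s l).getD i none =
      if (∃ ax ∈ l, pvNorm n ax = i) then some (-1) else s.getD i none := by
  induction l generalizing s with
  | nil => simp [pvMask]
  | cons ax l ih =>
    obtain ⟨ha1, ha2⟩ := hv ax (List.mem_cons_self ..)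
    simp only [pvMask, List.foldl_cons]
    have hrec := ih (s.set (pvNorm n ax) (some (-1))) (by simp [hs])
      (fun a ha => hv a (List.mem_cons_of_mem _ ha))
    simp only [pvMask] at hrec
    rw [hrec]
    have hlt : pvNorm n ax < n := pvNorm_lt n ax ha1 ha2
    rw [getD_set_eq _ _ _ _ (by omega)]
    by_cases hmem : ∃ a ∈ l, pvNorm n a = i <;> by_cases hax : pvNorm n ax = i <;>
      simp [hmem, hax]

theorem fill_fold (k : Nat) (t1 t2 : List (Option Int)) (n : Nat)
    (h1 : t1.length = n) (h2 : t2.length = n) (hk : k ≤ n) :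
    ((List.range k).foldl pvFillStep (t1, t2)).1.length = n ∧
    ((List.range k).foldl pvFillStep (t1, t2)).2.length = n ∧
    ∀ i : Nat,
      ((List.range k).foldl pvFillStep (t1, t2)).1.getD i none =
        (if i < k then pvF1 (t1.getD i none) (t2.getD i none) else t1.getD i none) ∧
      ((List.range k).foldl pvFillStep (t1, t2)).2.getD i none =
        (if i < k then pvF2 (t1.getD i none) (t2.getD i none) else t2.getD i none) := by
  induction k with
  | zero => simp [h1, h2]
  | succ k ih =>
    obtain ⟨ihl1, ihl2, ihp⟩ := ih (by omega)
    rw [List.range_succ, List.foldl_append] at *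
    set p := (List.range k).foldl pvFillStep (t1, t2) with hp
    simp only [List.foldl_cons, List.foldl_nil]
    obtain ⟨hpk1, hpk2⟩ := ihp k
    rw [if_neg (by omega)] at hpk1 hpk2
    set a := t1.getD k none with hadef
    set b := t2.getD k none with hbdef
    show (pvFillStep p k).1.length = n ∧ (pvFillStep p k).2.length = n ∧ _
    have hq1 : (pvFillStep p k).1 = if a = none then p.1.set k b else p.1 := by
      simp only [pvFillStep, hpk1, hpk2]
    have hq1len : (pvFillStep p k).1.length = n := by
      rw [hq1]; split_ifs <;> simp [ihl1]
    have hq1getD : ∀ i : Nat, (pvFillStep p k).1.getD i none =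
        if k = i then pvF1 a b else p.1.getD i none := by
      intro i
      rw [hq1]
      by_cases ha : a = none
      · rw [if_pos ha, getD_set_eq _ _ _ _ (by omega)]
        simp [pvF1, ha]
      · rw [if_neg ha]
        by_cases hki : k = i
        · subst hki; simp [pvF1, ha, ← List.getD_eq_getElem?_getD, hpk1]
        · simp [hki]
    have hq2 : (pvFillStep p k).2 = if b = none then p.2.set k (pvF1 a b) else p.2 := by
      simp only [pvFillStep, hpk1, hpk2]
      by_cases ha : a = none <;> by_cases hb : b = none <;>
        simp [ha, hb, pvF1, getD_set_eq _ _ _ _ (show k < p.1.length from by omega),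
          ← List.getD_eq_getElem?_getD, hpk1]
    have hq2len : (pvFillStep p k).2.length = n := by
      rw [hq2]; split_ifs <;> simp [ihl2]
    have hq2getD : ∀ i : Nat, (pvFillStep p k).2.getD i none =
        if k = i then pvF2 a b else p.2.getD i none := by
      intro i
      rw [hq2]
      by_cases hb : b = none
      · rw [if_pos hb, getD_set_eq _ _ _ _ (by omega)]
        simp [pvF2, hb]
      · rw [if_neg hb]
        by_cases hki : k = i
        · subst hki; simp [pvF2, hb, ← List.getD_eq_getElem?_getD, hpk2]
        · simp [hki]
    refine ⟨hq1len, hq2len, fun i => ⟨?_, ?_⟩⟩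
    · rw [hq1getD i]
      rcases lt_trichotomy i k with h | h | h
      · rw [if_neg (by omega), if_pos (by omega), (ihp i).1, if_pos h]
      · subst h; rw [if_pos rfl, if_pos (by omega), hadef, hbdef]
      · rw [if_neg (by omega), if_neg (by omega), (ihp i).1, if_neg (by omega)]
    · rw [hq2getD i]
      rcases lt_trichotomy i k with h | h | h
      · rw [if_neg (by omega), if_pos (by omega), (ihp i).2, if_pos h]
      · subst h; rw [if_pos rfl, if_pos (by omega), hadef, hbdef]
      · rw [if_neg (by omega), if_neg (by omega), (ihp i).2, if_neg (by omega)]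

-- list equality via getD, for lists of known equal length
theorem eq_iff_getD (u v : List (Option Int)) (n : Nat) (h1 : u.length = n) (h2 : v.length = n) :
    u = v ↔ ∀ i < n, u.getD i none = v.getD i none := by
  constructor
  · rintro rfl i _; rfl
  · intro h
    apply List.ext_getElem (by omega)
    intro i hi _
    have := h i (by omega)
    rwa [List.getD_eq_getElem u none (by omega), List.getD_eq_getElem v none (by omega)] at this

-- B's all-loop over enumerate(zip(..)) unfolded to a ∀ over positions
theorem alt_all_iff (s1 s2 : List (Option Int)) (n : Nat) (h1 : s1.length = n) (h2 : s2.length = n)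
    (f : Int × (Option Int × Option Int) → Bool) :
    ((PySem.List.enumerate (s1.zip s2) 0).all f = true ↔
      ∀ i < n, f ((i : Int), (s1.getD i none, s2.getD i none)) = true) := by
  rw [List.all_eq_true]
  constructor
  · intro h i hi
    have hz : i < (s1.zip s2).length := by simp [List.length_zip, h1, h2]; omega
    have hmem : ((i : Int), (s1.zip s2)[i]) ∈ PySem.List.enumerate (s1.zip s2) 0 := by
      rw [PySem.List.mem_enumerate_iff]
      exact ⟨i, hz, by simp⟩
    have := h _ hmem
    rw [List.getD_eq_getElem s1 none (by omega), List.getD_eq_getElem s2 none (by omega)]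
    simpa [List.getElem_zip] using this
  · intro h p hp
    rw [PySem.List.mem_enumerate_iff] at hp
    obtain ⟨k, hk, rfl⟩ := hp
    have hkn : k < n := by simp [List.length_zip, h1, h2] at hk; omega
    have := h k hkn
    rw [List.getD_eq_getElem s1 none (by omega), List.getD_eq_getElem s2 none (by omega)] at this
    simpa [List.getElem_zip] using this

-- under validity, B's modulo normalization agrees with Python's negative-index rule
theorem mod_eq_pvNorm (n : Nat) (ax : Int) (h1 : -(n : Int) ≤ ax) (h2 : ax < n) :
    PySem.Int.mod ax (n : Int) = ((pvNorm n ax : Nat) : Int) := by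
  have hn : (0:Int) < n := by omega
  rw [PySem.Int.mod_eq_emod_of_pos (a := ax) (b := (n:Int)) hn]
  unfold pvNorm
  split_ifs with h
  · have e1 : (ax + n) % (n:Int) = ax % n := by
      have := Int.add_mul_emod_self_left (a := ax) (b := (n:Int)) (c := 1)
      simpa using this
    have e2 : (ax + n) % (n:Int) = ax + n := Int.emod_eq_of_lt (by omega) (by omega)
    omega
  · have e2 : ax % (n:Int) = ax := Int.emod_eq_of_lt (by omega) (by omega)
    omega

-- skip-set membership ↔ some axis entry normalizes to i
theorem contains_skip (l : List Int) (n : Nat) (i : Nat)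
    (hv : ∀ ax ∈ l, -(n : Int) ≤ ax ∧ ax < (n : Int)) :
    (PySem.Set.contains (PySem.Set.ofList (l.map (fun ax => PySem.Int.mod ax (n : Int)))) (i : Int)
      = true) ↔ ∃ ax ∈ l, pvNorm n ax = i := by
  rw [PySem.Set.contains_iff, PySem.Set.mem_ofList, List.mem_map]
  constructor
  · rintro ⟨ax, hax, hmod⟩
    obtain ⟨ha1, ha2⟩ := hv ax hax
    rw [mod_eq_pvNorm n ax ha1 ha2] at hmod
    exact ⟨ax, hax, by omega⟩
  · rintro ⟨ax, hax, hnorm⟩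
    obtain ⟨ha1, ha2⟩ := hv ax hax
    exact ⟨ax, hax, by rw [mod_eq_pvNorm n ax ha1 ha2, hnorm]⟩

-- one position: A's post-processing equality ↔ B's pass condition
theorem pointwise (a b : Option Int) (an : Bool) (sk : Prop) [Decidable sk] :
    ((if an = true then
        pvF1 (if sk then some (-1) else a) (if sk then some (-1) else b) =
          pvF2 (if sk then some (-1) else a) (if sk then some (-1) else b)
      else (if sk then some (-1) else a) = (if sk then some (-1) else b)) ↔
      ((decide sk || pvPassPos a b an) = true)) := by
  by_cases hsk : sk <;> cases an <;> cases a <;> cases b <;>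
    simp [hsk, pvF1, pvF2, pvPassPos]

-- the central equivalence for equal-length shapes and a valid (possibly empty) axis list
theorem central (s1 s2 : List (Option Int)) (l : List Int) (an : Bool) (n : Nat)
    (h1 : s1.length = n) (h2 : s2.length = n)
    (hv : ∀ ax ∈ l, -(n : Int) ≤ ax ∧ ax < (n : Int)) :
    (match l.foldl pvMaskStep (some (s1, s2)) with
     | none => false
     | some p =>
       let q := if an then (List.range p.1.length).foldl pvFillStep p else p
       q.1 == q.2) =
    ((PySem.List.enumerate (s1.zip s2) 0).all fun ip =>
      PySem.Set.contains (PySem.Set.ofList (l.map (fun ax => PySem.Int.mod ax (n : Int)))) ip.1 ||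
        pvPassPos ip.2.1 ip.2.2 an) := by
  rw [mask_fold l s1 s2 n h1 h2 hv]
  have ht1 : (pvMask n s1 l).length = n := by rw [length_pvMask, h1]
  have ht2 : (pvMask n s2 l).length = n := by rw [length_pvMask, h2]
  rw [Bool.eq_iff_iff, alt_all_iff s1 s2 n h1 h2]
  have key : ∀ i < n,
      ((PySem.Set.contains (PySem.Set.ofList (l.map (fun ax => PySem.Int.mod ax (n : Int))))
          ((i : Nat) : Int) || pvPassPos (s1.getD i none) (s2.getD i none) an) = true ↔
        (if an then
            pvF1 ((pvMask n s1 l).getD i none) ((pvMask n s2 l).getD i none) =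
              pvF2 ((pvMask n s1 l).getD i none) ((pvMask n s2 l).getD i none)
          else ((pvMask n s1 l).getD i none = (pvMask n s2 l).getD i none))) := by
    intro i hi
    rw [getD_pvMask n s1 l i h1 hv, getD_pvMask n s2 l i h2 hv]
    rw [pointwise (s1.getD i none) (s2.getD i none) an (∃ ax ∈ l, pvNorm n ax = i)]
    have hc : (PySem.Set.contains (PySem.Set.ofList (l.map (fun ax => PySem.Int.mod ax (n : Int))))
        ((i : Nat) : Int)) = decide (∃ ax ∈ l, pvNorm n ax = i) := by
      by_cases h : ∃ ax ∈ l, pvNorm n ax = i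
      · exact ((contains_skip l n i hv).mpr h).trans (decide_eq_true h).symm
      · have hne : ¬ (PySem.Set.contains
            (PySem.Set.ofList (l.map (fun ax => PySem.Int.mod ax (n : Int)))) ((i : Nat) : Int)
            = true) := fun hcon => h ((contains_skip l n i hv).mp hcon)
        have hf : (PySem.Set.contains
            (PySem.Set.ofList (l.map (fun ax => PySem.Int.mod ax (n : Int)))) ((i : Nat) : Int))
            = false := by
          cases hcb : (PySem.Set.contains
            (PySem.Set.ofList (l.map (fun ax => PySem.Int.mod ax (n : Int)))) ((i : Nat) : Int))
          · rfl
          · exact absurd hcb hne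
        rw [hf, decide_eq_false h]
    rw [hc]
  cases an
  · simp only [Bool.false_eq_true, if_false, beq_iff_eq]
    rw [eq_iff_getD _ _ n ht1 ht2]
    constructor
    · intro h i hi
      rw [key i hi]
      simpa using h i hi
    · intro h i hi
      have := (key i hi).mp (h i hi)
      simpa using this
  · simp only [if_true, beq_iff_eq]
    obtain ⟨hl1, hl2, hpt⟩ := fill_fold (pvMask n s1 l).length (pvMask n s1 l) (pvMask n s2 l) n ht1 ht2 (by omega)
    rw [eq_iff_getD _ _ n hl1 hl2]
    constructor
    · intro h i hi
      rw [key i hi]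
      have := h i hi
      rw [(hpt i).1, (hpt i).2, if_pos (by omega), if_pos (by omega)] at this
      simpa using this
    · intro h i hi
      have := (key i hi).mp (h i hi)
      rw [(hpt i).1, (hpt i).2, if_pos (by omega), if_pos (by omega)]
      simpa using this

-- ===== VERDICT (by name: the statement is the Claim_ definition above) =====
theorem shape_equal_spec : Claim_equal_shape_equal := by
  intro s1 s2 axis an _ hpre
  unfold Spec_shape_equal shape_equal shape_equal_alt
  by_cases hlen : s1.length = s2.length
  · rw [if_neg (by omega), if_neg (by omega)]
    have hv := hpre hlen
    cases axis with
    | none =>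
      exact central s1 s2 [] an s1.length rfl hlen.symm (by simp)
    | some l =>
      exact central s1 s2 l an s1.length rfl hlen.symm hv
  · rw [if_pos (by omega), if_pos (by omega)]
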